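-- pv_equiv track=rewrite | github.com/UNIZAR-30226-2024-01/backend | bot/moveBot.py | acusacion
-- ===== SOURCE A (Python) =====
-- N_PLACES = 9
--
-- N_PEOPLE = 6
--
-- def acusacion(tarjeta):
-- 	info_place = False
-- 	info_who = False
-- 	info_weapon = False
--
-- 	idx_place = -1
-- 	idx_who = -1
-- 	idx_weapon = -1
--
-- 	# Comprobar si se puede hacer una acusación
-- 	for i in range(len(tarjeta)):
-- 		if i < N_PLACES:
-- 			# Lugares
-- 			if sum(tarjeta[i]) <= 10:
-- 				info_place = True
-- 				idx_place = i
-- 		else: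
-- 			if not info_place:
-- 				# No hay suficiente información para hacer una acusación
-- 				break
-- 			if i < N_PLACES+N_PEOPLE:
-- 				# Personas
-- 				if sum(tarjeta[i]) <= 10:
-- 					info_who = True
-- 					idx_who = i
-- 			else:
-- 				if not (info_who and info_place):
-- 					# No hay suficiente información para hacer una acusación
-- 					break
-- 				# Armas
-- 				if sum(tarjeta[i]) <= 10:
-- 					info_weapon = True
-- 					idx_weapon = i
--
-- 	return (info_place and info_who and info_weapon), idx_place, idx_who, idx_weapon
-- ===== SOURCE B (Python) =====
-- N_PLACES = 9
-- N_PEOPLE = 6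
--
-- def acusacion(tarjeta):
-- 	# Segment-based: find the LAST qualifying row of each phase by scanning
-- 	# that segment backwards, gating later phases on earlier ones.
-- 	def last_qual(lo, hi):
-- 		for i in range(min(hi, len(tarjeta)) - 1, lo - 1, -1):
-- 			if sum(tarjeta[i]) <= 10:
-- 				return i
-- 		return -1
--
-- 	idx_place = last_qual(0, N_PLACES)
-- 	idx_who = last_qual(N_PLACES, N_PLACES + N_PEOPLE) if idx_place != -1 else -1
-- 	idx_weapon = last_qual(N_PLACES + N_PEOPLE, len(tarjeta)) if idx_place != -1 and idx_who != -1 else -1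
-- 	return (idx_place != -1 and idx_who != -1 and idx_weapon != -1), idx_place, idx_who, idx_weapon
-- ===== Notes on version B (the rewrite author's own statement) =====
-- stated objective: simpler
-- what changed: Replaces the single forward loop with mutable flags and mid-loop breaks by three gated backward segment scans, each returning the last qualifying index directly (early return instead of flag carrying).
import Mathlib
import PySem

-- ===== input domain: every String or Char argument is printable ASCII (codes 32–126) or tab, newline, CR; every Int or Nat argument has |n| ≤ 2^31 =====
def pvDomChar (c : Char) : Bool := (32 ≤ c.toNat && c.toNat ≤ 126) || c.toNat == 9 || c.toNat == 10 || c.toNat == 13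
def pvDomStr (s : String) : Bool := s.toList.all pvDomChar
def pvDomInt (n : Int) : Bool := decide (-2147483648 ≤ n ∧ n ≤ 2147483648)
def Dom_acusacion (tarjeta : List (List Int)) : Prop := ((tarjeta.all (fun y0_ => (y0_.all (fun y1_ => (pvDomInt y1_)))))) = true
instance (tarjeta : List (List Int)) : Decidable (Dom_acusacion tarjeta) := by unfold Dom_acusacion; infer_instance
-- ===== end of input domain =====

-- B replaces A's single forward loop with flags/breaks by three gated backward
-- segment scans that return the last qualifying index directly (objective: simpler).

-- ===== PORT A =====
-- shared per-row test: sum(tarjeta[i]) <= 10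
def rowQ (t : List (List Int)) (i : Nat) : Bool := decide ((t.getD i []).sum ≤ 10)

-- A's for-loop over range(len(tarjeta)): state = (info_place, info_who, info_weapon, idx_place, idx_who, idx_weapon); `break` returns the state
def acusacionLoop (t : List (List Int)) :
    List Nat → Bool × Bool × Bool × Int × Int × Int → Bool × Bool × Bool × Int × Int × Int
  | [], st => st
  | i :: rest, (ip, iw, iwe, pp, pw, pwe) =>
    if i < 9 then  -- N_PLACES
      if rowQ t i then acusacionLoop t rest (true, iw, iwe, (i : Int), pw, pwe)
      else acusacionLoop t rest (ip, iw, iwe, pp, pw, pwe)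
    else if !ip then (ip, iw, iwe, pp, pw, pwe)  -- break
    else if i < 15 then  -- N_PLACES + N_PEOPLE
      if rowQ t i then acusacionLoop t rest (ip, true, iwe, pp, (i : Int), pwe)
      else acusacionLoop t rest (ip, iw, iwe, pp, pw, pwe)
    else if !(iw && ip) then (ip, iw, iwe, pp, pw, pwe)  -- break
    else if rowQ t i then acusacionLoop t rest (ip, iw, true, pp, pw, (i : Int))
    else acusacionLoop t rest (ip, iw, iwe, pp, pw, pwe)

def acusacion (tarjeta : List (List Int)) : Bool × Int × Int × Int :=
  match acusacionLoop tarjeta (List.range tarjeta.length) (false, false, false, -1, -1, -1) with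
  | (ip, iw, iwe, pp, pw, pwe) => ((ip && iw && iwe), pp, pw, pwe)

-- ===== PORT B =====
-- backward scan of indices lo..min(hi,len)-1 for the first (i.e. last) qualifying row
def lastQual (t : List (List Int)) (lo hi : Nat) : Int :=
  match (List.range' lo (min hi t.length - lo)).reverse.find? (fun i => rowQ t i) with
  | some i => (i : Int)
  | none => -1

def acusacion_alt (tarjeta : List (List Int)) : Bool × Int × Int × Int :=
  let p := lastQual tarjeta 0 9
  let w := if p ≠ -1 then lastQual tarjeta 9 15 else -1
  let a := if p ≠ -1 ∧ w ≠ -1 then lastQual tarjeta 15 tarjeta.length else -1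
  ((decide (p ≠ -1) && decide (w ≠ -1) && decide (a ≠ -1)), p, w, a)

-- ===== PRECONDITION & SPEC =====
def Spec_acusacion (tarjeta : List (List Int)) (out : Bool × Int × Int × Int) : Prop := out = acusacion_alt tarjeta
instance (tarjeta : List (List Int)) (out : Bool × Int × Int × Int) : Decidable (Spec_acusacion tarjeta out) := by unfold Spec_acusacion; infer_instance

-- ===== CLAIM (what is proved, stated in full; the proofs are below) =====
def Claim_equal_acusacion : Prop := ∀ (tarjeta : List (List Int)), Dom_acusacion tarjeta → Spec_acusacion tarjeta (acusacion tarjeta)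

-- ===== LEMMAS AND PROOFS =====

-- "last qualifying index in is, else f" in B's find?-on-reverse form
def lastAux (t : List (List Int)) (is : List Nat) (f : Int) : Int :=
  match is.reverse.find? (fun i => rowQ t i) with
  | some j => (j : Int)
  | none => f

theorem lastAux_nil (t : List (List Int)) (f : Int) : lastAux t [] f = f := rfl

theorem lastAux_cons (t : List (List Int)) (i : Nat) (is : List Nat) (f : Int) :
    lastAux t (i :: is) f = lastAux t is (if rowQ t i then (i : Int) else f) := by
  simp only [lastAux, List.reverse_cons, List.find?_append]
  cases h : is.reverse.find? (fun i => rowQ t i) <;> cases hq : rowQ t i <;>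
    simp [List.find?, hq]

theorem lastAux_ne_neg1 (t : List (List Int)) (is : List Nat) :
    (lastAux t is (-1) ≠ -1) ↔ is.any (fun i => rowQ t i) = true := by
  unfold lastAux
  cases h : is.reverse.find? (fun i => rowQ t i) with
  | none =>
      simp only [ne_eq, not_true_eq_false, false_iff]
      rw [List.find?_eq_none] at h
      simp only [List.any_eq_true]
      rintro ⟨x, hx, hq⟩
      exact absurd hq (by simpa using h x (List.mem_reverse.mpr hx))
  | some j =>
      have hm := List.mem_of_find?_eq_some h
      have hq := List.find?_some h
      have hj : (0 : Int) ≤ (j : Int) := Int.natCast_nonneg j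
      simp only [ne_eq]
      constructor
      · intro _; exact List.any_eq_true.mpr ⟨j, List.mem_reverse.mp hm, hq⟩
      · intro _; omega

-- phase 1: indices < 9 update only the place flag/index
theorem loop_phase1 (t : List (List Int)) (is bs : List Nat)
    (h : ∀ i ∈ is, i < 9) (ip iw iwe : Bool) (pp pw pwe : Int) :
    acusacionLoop t (is ++ bs) (ip, iw, iwe, pp, pw, pwe) =
      acusacionLoop t bs ((ip || is.any (fun i => rowQ t i)), iw, iwe, lastAux t is pp, pw, pwe) := by
  induction is generalizing ip pp with
  | nil => simp [lastAux_nil]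
  | cons i is ih =>
      have hi : i < 9 := h i (List.mem_cons_self ..)
      have h' : ∀ j ∈ is, j < 9 := fun j hj => h j (List.mem_cons_of_mem _ hj)
      cases hq : rowQ t i with
      | true => simp [List.cons_append, acusacionLoop, hi, hq, lastAux_cons, ih h']
      | false => simp [List.cons_append, acusacionLoop, hi, hq, lastAux_cons, ih h']

-- break when an index ≥ 9 is reached without info_place
theorem loop_break2 (t : List (List Int)) (i : Nat) (is : List Nat) (hi : 9 ≤ i)
    (iw iwe : Bool) (pp pw pwe : Int) :
    acusacionLoop t (i :: is) (false, iw, iwe, pp, pw, pwe) = (false, iw, iwe, pp, pw, pwe) := by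
  have : ¬ i < 9 := by omega
  simp [acusacionLoop, this]

-- phase 2: info_place set, indices in [9,15) update only the who flag/index
theorem loop_phase2 (t : List (List Int)) (is bs : List Nat)
    (h : ∀ i ∈ is, 9 ≤ i ∧ i < 15) (iw iwe : Bool) (pp pw pwe : Int) :
    acusacionLoop t (is ++ bs) (true, iw, iwe, pp, pw, pwe) =
      acusacionLoop t bs (true, (iw || is.any (fun i => rowQ t i)), iwe, pp, lastAux t is pw, pwe) := by
  induction is generalizing iw pw with
  | nil => simp [lastAux_nil]
  | cons i is ih =>
      obtain ⟨h9, h15⟩ := h i (List.mem_cons_self ..)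
      have h' : ∀ j ∈ is, 9 ≤ j ∧ j < 15 := fun j hj => h j (List.mem_cons_of_mem _ hj)
      have hn9 : ¬ i < 9 := by omega
      cases hq : rowQ t i with
      | true => simp [List.cons_append, acusacionLoop, hn9, h15, hq, lastAux_cons, ih h']
      | false => simp [List.cons_append, acusacionLoop, hn9, h15, hq, lastAux_cons, ih h']

-- break when an index ≥ 15 is reached without info_who
theorem loop_break3 (t : List (List Int)) (i : Nat) (is : List Nat) (hi : 15 ≤ i)
    (iwe : Bool) (pp pw pwe : Int) :
    acusacionLoop t (i :: is) (true, false, iwe, pp, pw, pwe) = (true, false, iwe, pp, pw, pwe) := by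
  have h9 : ¬ i < 9 := by omega
  have h15 : ¬ i < 15 := by omega
  simp [acusacionLoop, h9, h15]

-- phase 3: both flags set, indices ≥ 15 update only the weapon flag/index
theorem loop_phase3 (t : List (List Int)) (is : List Nat)
    (h : ∀ i ∈ is, 15 ≤ i) (iwe : Bool) (pp pw pwe : Int) :
    acusacionLoop t is (true, true, iwe, pp, pw, pwe) =
      (true, true, (iwe || is.any (fun i => rowQ t i)), pp, pw, lastAux t is pwe) := by
  induction is generalizing iwe pwe with
  | nil => simp [acusacionLoop, lastAux_nil]
  | cons i is ih =>
      have hi := h i (List.mem_cons_self ..)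
      have h' : ∀ j ∈ is, 15 ≤ j := fun j hj => h j (List.mem_cons_of_mem _ hj)
      have h9 : ¬ i < 9 := by omega
      have h15 : ¬ i < 15 := by omega
      cases hq : rowQ t i with
      | true => simp [acusacionLoop, h9, h15, hq, lastAux_cons, ih h']
      | false => simp [acusacionLoop, h9, h15, hq, lastAux_cons, ih h']

theorem lastQual_eq (t : List (List Int)) (lo hi : Nat) :
    lastQual t lo hi = lastAux t (List.range' lo (min hi t.length - lo)) (-1) := rfl

theorem range_split3 (n : Nat) :
    List.range n = (List.range' 0 (min 9 n) ++ List.range' (min 9 n) (min 15 n - min 9 n))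
      ++ List.range' (min 15 n) (n - min 15 n) := by
  have e1 : min 9 n + (min 15 n - min 9 n) = min 15 n := by omega
  have e2 : min 15 n + (n - min 15 n) = n := by omega
  have A1 : List.range' 0 (min 9 n) ++ List.range' (0 + min 9 n) (min 15 n - min 9 n)
      = List.range' 0 (min 9 n + (min 15 n - min 9 n)) := List.range'_append_1 ..
  have A2 : List.range' 0 (min 15 n) ++ List.range' (0 + min 15 n) (n - min 15 n)
      = List.range' 0 (min 15 n + (n - min 15 n)) := List.range'_append_1 ..
  rw [List.range_eq_range']
  simp only [Nat.zero_add] at A1 A2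
  rw [A1, e1, A2, e2]

theorem any_eq_false_of (t : List (List Int)) (is : List Nat)
    (h : lastAux t is (-1) = -1) : is.any (fun i => rowQ t i) = false := by
  cases ha : is.any (fun i => rowQ t i) with
  | false => rfl
  | true => exact absurd h ((lastAux_ne_neg1 t is).mpr ha)

-- ===== VERDICT (by name: the statement is the Claim_ definition above) =====
theorem acusacion_spec : Claim_equal_acusacion := by
  intro t _
  unfold Spec_acusacion acusacion acusacion_alt
  rw [lastQual_eq, lastQual_eq, lastQual_eq, Nat.sub_zero, Nat.min_self]
  rw [range_split3 t.length]
  have hmem1 : ∀ i ∈ List.range' 0 (min 9 t.length), i < 9 := by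
    intro i hi; rw [List.mem_range'_1] at hi; omega
  rw [List.append_assoc, loop_phase1 t (List.range' 0 (min 9 t.length)) _ hmem1]
  simp only [Bool.false_or]
  by_cases hn9 : t.length ≤ 9
  · -- everything is the places segment; who/weapon ranges are empty
    have m9 : min 9 t.length = t.length := by omega
    have m15 : min 15 t.length = t.length := by omega
    have z3 : t.length - 9 = 0 := by omega
    have z2 : t.length - 15 = 0 := by omega
    simp only [m9, m15, z3, z2, Nat.sub_self, List.range'_zero, List.append_nil,
      acusacionLoop, lastAux_nil]
    simp
  · have m9 : min 9 t.length = 9 := by omega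
    simp only [m9]
    by_cases hP : lastAux t (List.range' 0 9) (-1) = -1
    · -- no place info: A breaks at index 9, B gates who/weapon off
      rw [any_eq_false_of t _ hP]
      obtain ⟨k, hk⟩ : ∃ k, min 15 t.length - 9 = k + 1 := ⟨min 15 t.length - 10, by omega⟩
      rw [hk, List.range'_succ, List.cons_append,
        loop_break2 t 9 _ (le_refl 9)]
      simp [hP]
    · rw [(lastAux_ne_neg1 t _).mp hP]
      have hmem2 : ∀ i ∈ List.range' 9 (min 15 t.length - 9), 9 ≤ i ∧ i < 15 := by
        intro i hi; rw [List.mem_range'_1] at hi; omega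
      rw [loop_phase2 t (List.range' 9 (min 15 t.length - 9)) _ hmem2]
      simp only [Bool.false_or]
      by_cases hn15 : t.length ≤ 15
      · -- weapons segment is empty
        have m15 : min 15 t.length = t.length := by omega
        have z2 : t.length - 15 = 0 := by omega
        simp only [m15, Nat.sub_self, z2, List.range'_zero, acusacionLoop, lastAux_nil]
        simp [hP]
      · have m15 : min 15 t.length = 15 := by omega
        simp only [m15]
        by_cases hW : lastAux t (List.range' 9 (15 - 9)) (-1) = -1
        · -- no who info: A breaks at index 15, B gates weapons off
          rw [any_eq_false_of t _ hW]
          obtain ⟨k, hk⟩ : ∃ k, t.length - 15 = k + 1 := ⟨t.length - 16, by omega⟩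
          rw [hk, List.range'_succ,
            loop_break3 t 15 _ (le_refl 15)]
          simp [hP, hW]
        · rw [(lastAux_ne_neg1 t _).mp hW]
          have hmem3 : ∀ i ∈ List.range' 15 (t.length - 15), 15 ≤ i := by
            intro i hi; rw [List.mem_range'_1] at hi; omega
          rw [loop_phase3 t (List.range' 15 (t.length - 15)) hmem3]
          by_cases hZ : lastAux t (List.range' 15 (t.length - 15)) (-1) = -1
          · rw [any_eq_false_of t _ hZ]
            simp [hP, hW, hZ]
          · rw [(lastAux_ne_neg1 t _).mp hZ]
            simp [hP, hW, hZ]
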